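-- pv_equiv track=rewrite | github.com/Oava-oava/Najot-ta-lim | vazifa_va_darslar/vazifalar 09.07.2024/funcs.py | Yaqin_Unli
-- ===== SOURCE A (Python) =====
-- def Yaqin_Unli(harf):
--     english_alphabet = [
--     'A', 'B', 'C', 'D', 'E', 'F', 'G', 'H', 'I', 'J', 'K', 'L', 'M', 'N', 'O', 'P', 'Q', 'R', 'S', 'T', 'U', 'V', 'W', 'X', 'Y', 'Z',
--     'a', 'b', 'c', 'd', 'e', 'f', 'g', 'h', 'i', 'j', 'k', 'l', 'm', 'n', 'o', 'p', 'q', 'r', 's', 't', 'u', 'v', 'w', 'x', 'y', 'z'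
-- ]
--     harf = harf.lower()
--     if len(harf) == 1 and harf in english_alphabet:
--         unli = ['a', 'e', 'i', 'u', 'o']
--         kam = abs(ord(harf) - ord(unli[0]))
--         tanlangan_harf = unli[0]
--
--         for i in range(1 ,len(unli)):
--             if  abs(ord(harf) - ord(unli[i])) < kam:
--                 kam =  abs(ord(harf) - ord(unli[i]))
--                 tanlangan_harf = unli[i]
--         return tanlangan_harf
--     elif len(harf) > 1:
--         string = "Kiritilgan argumentlar soni 1 dan oshib ketdi."
--         return string
--     elif harf not in english_alphabet:
--         string = "Harf kiriting iltimos."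
--         return string
-- ===== SOURCE B (Python) =====
-- VOWELS = "aeiuo"
-- ALPHABET = "abcdefghijklmnopqrstuvwxyz"
-- # one-time table: nearest vowel for each lowercase letter (strict-less scan order a,e,i,u,o = stable min)
-- NEAREST = {c: min(VOWELS, key=lambda v: abs(ord(c) - ord(v))) for c in ALPHABET}
--
-- def Yaqin_Unli(harf):
--     harf = harf.lower()
--     if len(harf) == 1 and harf in NEAREST:
--         return NEAREST[harf]
--     if len(harf) > 1:
--         return "Kiritilgan argumentlar soni 1 dan oshib ketdi."
--     return "Harf kiriting iltimos."
-- ===== Notes on version B (the rewrite author's own statement) =====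
-- stated objective: idiomatic
-- what changed: B precomputes a module-level dict mapping each lowercase letter to its nearest vowel (stable min over a,e,i,u,o), so the per-call path is lowercase + length check + one dict lookup instead of A's per-call distance-minimizing scan and alphabet-list membership test.
import Mathlib
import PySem

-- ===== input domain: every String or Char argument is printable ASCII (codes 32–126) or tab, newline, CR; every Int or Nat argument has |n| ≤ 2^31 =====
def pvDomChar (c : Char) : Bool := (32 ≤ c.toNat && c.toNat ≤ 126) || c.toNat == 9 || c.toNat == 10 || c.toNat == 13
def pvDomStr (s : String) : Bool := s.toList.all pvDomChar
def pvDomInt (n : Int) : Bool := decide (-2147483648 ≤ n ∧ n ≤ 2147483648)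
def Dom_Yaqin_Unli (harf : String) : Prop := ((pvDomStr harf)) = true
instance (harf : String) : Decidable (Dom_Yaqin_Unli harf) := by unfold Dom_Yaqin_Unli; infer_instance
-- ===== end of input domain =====

-- B replaces A's per-call nearest-vowel scan by a precomputed table and a single lookup (idiomatic; same result).

-- ===== PORT A =====
-- ord(s) for the 1-char strings the guard admits (exact there)
def pvOrd (s : String) : Int := ((s.toList.headD 'a').toNat : Int)

def pvAlphabetA : List String :=
  ["A","B","C","D","E","F","G","H","I","J","K","L","M","N","O","P","Q","R","S","T","U","V","W","X","Y","Z",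
   "a","b","c","d","e","f","g","h","i","j","k","l","m","n","o","p","q","r","s","t","u","v","w","x","y","z"]

def Yaqin_Unli (harf : String) : String :=
  let h := PySem.Str.lower harf
  if PySem.Str.len h == 1 && pvAlphabetA.contains h then
    let unli : List String := ["a", "e", "i", "u", "o"]
    let st := (PySem.List.pyRange 1 (PySem.List.len unli) 1).foldl
      (fun (st : Int × String) i =>
        let v := PySem.List.pyGetD unli i ""
        if ((pvOrd h - pvOrd v).natAbs : Int) < st.1 then (((pvOrd h - pvOrd v).natAbs : Int), v) else st)
      (((pvOrd h - pvOrd (PySem.List.pyGetD unli 0 "")).natAbs : Int), PySem.List.pyGetD unli 0 "")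
    st.2
  else if PySem.Str.len h > 1 then
    "Kiritilgan argumentlar soni 1 dan oshib ketdi."
  else if !(pvAlphabetA.contains h) then
    "Harf kiriting iltimos."
  else
    ""  -- unreachable: Python's implicit None; any 1-char non-member already hit the previous branch

-- ===== PORT B =====
-- module-level table: for each lowercase letter, min over vowels by |ord c - ord v| (stable: first minimum wins)
def pvNearest : PySem.Dict String String :=
  "abcdefghijklmnopqrstuvwxyz".toList.foldl
    (fun d c =>
      let s := String.ofList [c]
      d.insert s (PySem.List.minD ["a", "e", "i", "u", "o"]
        (fun v => ((pvOrd s - pvOrd v).natAbs : Int)) s))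
    (PySem.Dict.empty)

def Yaqin_Unli_alt (harf : String) : String :=
  let h := PySem.Str.lower harf
  if PySem.Str.len h == 1 then
    match pvNearest.get? h with
    | some v => v
    | none => "Harf kiriting iltimos."
  else if PySem.Str.len h > 1 then
    "Kiritilgan argumentlar soni 1 dan oshib ketdi."
  else
    "Harf kiriting iltimos."

-- ===== PRECONDITION & SPEC =====
def Spec_Yaqin_Unli (harf : String) (out : String) : Prop := out = Yaqin_Unli_alt harf
instance (harf : String) (out : String) : Decidable (Spec_Yaqin_Unli harf out) := by unfold Spec_Yaqin_Unli; infer_instance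

-- ===== CLAIM (what is proved, stated in full; the proofs are below) =====
def Claim_equal_Yaqin_Unli : Prop := ∀ (harf : String), Dom_Yaqin_Unli harf → Spec_Yaqin_Unli harf (Yaqin_Unli harf)

-- ===== LEMMAS AND PROOFS =====

-- the single-char case, checked for every character code the domain admits
set_option maxRecDepth 8192 in
theorem pv_one_char : ∀ n ∈ List.range 127,
    Yaqin_Unli (String.ofList [Char.ofNat n]) = Yaqin_Unli_alt (String.ofList [Char.ofNat n]) := by
  decide

theorem pv_len_lower (s : String) :
    PySem.Str.len (PySem.Str.lower s) = (s.toList.length : Int) := by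
  rw [PySem.Str.len_eq]
  simp [pysem, PySem.Chars.lower]

-- ===== VERDICT (by name: the statement is the Claim_ definition above) =====
theorem Yaqin_Unli_spec : Claim_equal_Yaqin_Unli := by
  intro harf hdom
  show Yaqin_Unli harf = Yaqin_Unli_alt harf
  have hmk : String.ofList harf.toList = harf := String.ofList_toList
  rcases h : harf.toList with _ | ⟨c, _ | ⟨c2, rest⟩⟩
  · -- empty string
    rw [← hmk, h]; decide
  · -- single char: use pv_one_char at n = c.toNat
    have hc : pvDomChar c = true := by
      have := hdom
      unfold Dom_Yaqin_Unli pvDomStr at this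
      rw [h] at this
      simpa using this
    have hlt : c.toNat < 127 := by
      unfold pvDomChar at hc
      simp only [Bool.or_eq_true, Bool.and_eq_true, decide_eq_true_eq, beq_iff_eq] at hc
      omega
    have := pv_one_char c.toNat (List.mem_range.mpr hlt)
    rw [Char.ofNat_toNat] at this
    rw [← hmk, h]
    exact this
  · -- length ≥ 2: both take the "too long" branch
    have hlen : PySem.Str.len (PySem.Str.lower harf) = (rest.length + 2 : Int) := by
      rw [pv_len_lower, h]; simp; ring
    simp only [Yaqin_Unli, Yaqin_Unli_alt, hlen]
    have hb : ((((rest.length : Int)) + 2) == 1) = false := beq_eq_false_iff_ne.mpr (by omega)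
    rw [hb]
    simp only [Bool.false_and, Bool.false_eq_true, if_false]
    rw [if_pos (show ((rest.length : Int) + 2 > 1) by omega),
        if_pos (show ((rest.length : Int) + 2 > 1) by omega)]
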